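-- pv_equiv track=rewrite | github.com/Nicolay-Belyaev/PyIntro | Seminar03/Homework_Seminar03_NegaFibo.py | nego_fibo
-- ===== SOURCE A (Python) =====
-- def nego_fibo(border):
--     def fibo(pos):
--         if pos == 0:
--             return 0
--         if pos in (1, 2):
--             return 1
--         return fibo(pos - 1) + fibo(pos - 2)
--
--     def fibo_filler(size: int):
--         base_array = []
--         for i in range(size + 1):
--             base_array.append(fibo(i))
--         return base_array
--
--     def mirror(array: list):
--         array.reverse()
--         array.remove(0)
--         for i in range(0, len(array), 2):
--             array[i] = -array[i]
--         return array
--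
--     def glue(array1: list, array2: list):  # можно extend'ом, но когда начала делать костыли, сложно остановиться
--         for i in range(len(array2)):
--             array1.append(array2[i])
--         return array1
--
--     array_1 = fibo_filler(border)
--     array_2 = mirror(fibo_filler(border))
--     res = glue(array_2, array_1)
--     return res
-- ===== SOURCE B (Python) =====
-- def nego_fibo(border):
--     fibs = [0, 1]
--     while len(fibs) <= border:
--         fibs.append(fibs[-1] + fibs[-2])
--     fibs = fibs[:border + 1]
--     left = [-f if i % 2 == 0 else f for i, f in enumerate(reversed(fibs[1:]))]
--     return left + fibs
-- ===== Notes on version B (the rewrite author's own statement) =====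
-- stated objective: faster
-- what changed: Replaced the exponential naive recursive fibo and the index-by-index mirror/glue loops with one iterative DP pass building the Fibonacci list, a reversed-tail comprehension with sign by index parity, and plain concatenation; intended as faster (probe: A timed out from n=16 while B returned in <1ms, so no both-finished large size confirmed the ratio).
import Mathlib
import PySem

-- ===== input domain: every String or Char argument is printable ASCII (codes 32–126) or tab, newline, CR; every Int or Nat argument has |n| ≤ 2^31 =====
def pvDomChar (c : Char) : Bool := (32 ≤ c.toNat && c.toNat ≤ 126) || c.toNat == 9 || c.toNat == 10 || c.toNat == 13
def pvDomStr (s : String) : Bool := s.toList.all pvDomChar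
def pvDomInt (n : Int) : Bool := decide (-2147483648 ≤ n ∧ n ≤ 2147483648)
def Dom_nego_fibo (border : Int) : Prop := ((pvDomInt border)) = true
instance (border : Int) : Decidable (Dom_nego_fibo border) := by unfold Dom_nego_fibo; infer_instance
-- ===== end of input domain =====

-- B replaces A's exponential recursive Fibonacci and index loops by one linear DP pass
-- plus a reversed-tail sign comprehension; intended as faster (a timing run measured
-- A timing out from n=16 up while B returns instantly, so the speed-up was not formally confirmed at a size both finish).

-- ===== PORT A =====
-- fibo: naive double recursion; only ever called on the nonnegative ints of range(size+1),
-- so it is transcribed as the same branch structure over Nat.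
def fiboA : Nat → Int
  | 0 => 0
  | 1 => 1
  | 2 => 1
  | n + 3 => fiboA (n + 2) + fiboA (n + 1)

-- for i in range(size + 1): base_array.append(fibo(i)); i is nonnegative, so i.toNat is exact.
def fibo_fillerA (size : Int) : List Int :=
  (PySem.List.pyRange 0 (size + 1) 1).foldl (fun a i => a ++ [fiboA i.toNat]) []

-- array.reverse(); array.remove(0) (none = ValueError); then for i in range(0, len(array), 2): array[i] = -array[i].
def mirrorA (array : List Int) : Option (List Int) :=
  let array := array.reverse
  match PySem.List.remove? array 0 with
  | none => none
  | some array =>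
      some ((PySem.List.pyRange 0 (array.length : Int) 2).foldl
        (fun a i => PySem.List.pySetD a i (-(PySem.List.pyGetD a i 0))) array)

-- for i in range(len(array2)): array1.append(array2[i])
def glueA (array1 array2 : List Int) : List Int :=
  (PySem.List.pyRange 0 (array2.length : Int) 1).foldl
    (fun a i => a ++ [PySem.List.pyGetD array2 i 0]) array1

def nego_fibo (border : Int) : List Int :=
  let array_1 := fibo_fillerA border
  match mirrorA (fibo_fillerA border) with
  | none => []   -- unreachable under Pre_ (ValueError in Python)
  | some array_2 => glueA array_2 array_1

-- ===== PORT B =====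
-- while len(fibs) <= border: fibs.append(fibs[-1] + fibs[-2])
def growFibsB (border : Int) (fibs : List Int) : List Int :=
  if (fibs.length : Int) ≤ border then
    growFibsB border (fibs ++ [PySem.List.pyGetD fibs (-1) 0 + PySem.List.pyGetD fibs (-2) 0])
  else fibs
termination_by (border + 1 - fibs.length).toNat
decreasing_by simp; omega

def nego_fibo_alt (border : Int) : List Int :=
  let fibs := growFibsB border [0, 1]
  let fibs := PySem.List.slice fibs none (some (border + 1))
  let left := (PySem.List.enumerate (PySem.List.slice fibs (some 1) none).reverse 0).map
    (fun p => if PySem.Int.mod p.1 2 == 0 then -p.2 else p.2)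
  left ++ fibs

-- ===== PRECONDITION & SPEC =====
-- For negative border the mirrored array is empty, so A's remove call raises ValueError.
def Pre_nego_fibo (border : Int) : Prop := 0 ≤ border
instance (border : Int) : Decidable (Pre_nego_fibo border) := by unfold Pre_nego_fibo; infer_instance
def pvWitness_nego_fibo : Int := (5)

def Spec_nego_fibo (border : Int) (out : List Int) : Prop := out = nego_fibo_alt border
instance (border : Int) (out : List Int) : Decidable (Spec_nego_fibo border out) := by unfold Spec_nego_fibo; infer_instance

-- ===== CLAIM (what is proved, stated in full; the proofs are below) =====
def Claim_equal_nego_fibo : Prop := ∀ (border : Int), Dom_nego_fibo border → Pre_nego_fibo border → Spec_nego_fibo border (nego_fibo border)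

-- ===== LEMMAS AND PROOFS =====

-- canonical fib prefix [fib 0, …, fib n]
def fibList (n : Nat) : List Int := (List.range (n + 1)).map fiboA

theorem fiboA_succ_pos (n : Nat) : 1 ≤ fiboA (n + 1) := by
  induction n using Nat.strong_induction_on with
  | _ n ih =>
    match n with
    | 0 => decide
    | 1 => decide
    | (m + 2) =>
      have h1 : 1 ≤ fiboA (m + 2) := ih (m + 1) (by omega)
      have h2 : 1 ≤ fiboA (m + 1) := ih m (by omega)
      show 1 ≤ fiboA (m + 2) + fiboA (m + 1)
      omega

theorem fiboA_add (m : Nat) (h : 1 ≤ m) : fiboA (m + 1) = fiboA m + fiboA (m - 1) := by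
  match m, h with
  | 1, _ => decide
  | (k + 2), _ => rfl

theorem foldl_append_map {α β : Type} (f : α → β) (l : List α) (acc : List β) :
    l.foldl (fun a x => a ++ [f x]) acc = acc ++ l.map f := by
  induction l generalizing acc with
  | nil => simp
  | cons x t ih => simp [List.foldl_cons, ih]

theorem fillerA_eq (n : Nat) : fibo_fillerA (n : Int) = fibList n := by
  unfold fibo_fillerA fibList
  have : ((n : Int) + 1) = ((n + 1 : Nat) : Int) := by push_cast; ring
  rw [this, foldl_append_map]
  rw [show PySem.List.pyRange 0 ((n + 1 : Nat) : Int) 1 = PySem.List.pyRange 0 ((n + 1 : Nat) : Int) from rfl]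
  rw [PySem.List.pyRange_zero]
  simp only [List.map_map, Int.toNat_natCast, List.nil_append]
  rfl

-- the strictly-positive tail reversed: [fib n, …, fib 1]
def revTail (n : Nat) : List Int := ((List.range n).map (fun i => fiboA (i + 1))).reverse

theorem zero_not_mem_revTail (n : Nat) : (0 : Int) ∉ revTail n := by
  unfold revTail
  simp only [List.mem_reverse, List.mem_map]
  rintro ⟨i, -, h⟩
  have := fiboA_succ_pos i
  omega

theorem fibList_reverse (n : Nat) : (fibList n).reverse = revTail n ++ [0] := by
  unfold fibList revTail
  rw [List.range_succ_eq_map]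
  simp only [List.map_cons, List.map_map, List.reverse_cons]
  congr 1

theorem remove?_append_zero {l : List Int} (h : (0 : Int) ∉ l) :
    PySem.List.remove? (l ++ [0]) 0 = some l := by
  induction l with
  | nil => simp [PySem.List.remove?_cons_self]
  | cons x t ih =>
    have hx : x ≠ 0 := by intro hx; exact h (by simp [hx])
    rw [List.cons_append, PySem.List.remove?_cons_of_ne _ hx,
        ih (fun hm => h (List.mem_cons_of_mem _ hm))]
    rfl

-- the negate-every-even-index loop, characterised elementwise
theorem foldl_negset_getElem? (idxs : List Int) (l : List Int)
    (hnodup : idxs.Nodup) (hrange : ∀ i ∈ idxs, 0 ≤ i ∧ i < (l.length : Int)) :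
    ∀ j : Nat, (idxs.foldl (fun a i => PySem.List.pySetD a i (-(PySem.List.pyGetD a i 0))) l)[j]? =
      if (j : Int) ∈ idxs then (l[j]?).map Neg.neg else l[j]? := by
  induction idxs generalizing l with
  | nil => intro j; simp
  | cons i t ih =>
    intro j
    obtain ⟨hi0, hil⟩ := hrange i (List.mem_cons_self)
    have hn : i = ((i.toNat : Nat) : Int) := by omega
    have hlt : i.toNat < l.length := by omega
    set a' := PySem.List.pySetD l i (-(PySem.List.pyGetD l i 0)) with ha'
    have hv : PySem.List.pyGetD l i 0 = l[i.toNat]'hlt := by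
      rw [PySem.List.pyGetD_of_nonneg _ _ hi0]
      exact List.getD_eq_getElem l 0 hlt
    have ha'get : ∀ k : Nat, a'[k]? = if (k : Int) = i then (l[k]?).map Neg.neg else l[k]? := by
      intro k
      rw [ha', hn, PySem.List.pySetD_natCast, List.getElem?_set]
      by_cases hkn : i.toNat = k
      · subst hkn
        rw [if_pos rfl, if_pos hlt, if_pos rfl, List.getElem?_eq_getElem hlt]
        simp only [Option.map_some]
        rw [← hn, hv]
      · have hki : ¬ ((k : Int) = ((i.toNat : Nat) : Int)) := by omega
        rw [if_neg hkn, if_neg hki]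
    rw [List.foldl_cons, ← ha',
        ih a' (hnodup.of_cons)
          (by intro x hx
              have h1 := hrange x (List.mem_cons_of_mem _ hx)
              have h2 : a'.length = l.length := by rw [ha']; exact PySem.List.length_pySetD l i _
              omega)]
    by_cases hjt : (j : Int) ∈ t
    · have hji : (j : Int) ≠ i := by
        intro he; exact (List.nodup_cons.mp hnodup).1 (he ▸ hjt)
      simp [hjt, ha'get j, hji, List.mem_cons]
    · rw [if_neg hjt, ha'get j]
      by_cases hji : (j : Int) = i <;> simp [hji, List.mem_cons, hjt]

theorem nodup_pyRange_two (n : Int) : (PySem.List.pyRange 0 n 2).Nodup := by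
  rw [PySem.List.pyRange_of_pos 0 n (by norm_num)]
  refine List.Nodup.map ?_ (List.nodup_range)
  intro a b h
  simp only at h
  omega

theorem mem_pyRange_two (n : Int) (x : Int) : x ∈ PySem.List.pyRange 0 n 2 ↔ 0 ≤ x ∧ x < n ∧ (2 : Int) ∣ x := by
  rw [PySem.List.mem_pyRange_iff_of_pos (by norm_num)]
  simp

-- B's comprehension, characterised elementwise
theorem enumMap_getElem? (l : List Int) (j : Nat) :
    ((PySem.List.enumerate l 0).map (fun p => if PySem.Int.mod p.1 2 == 0 then -p.2 else p.2))[j]? =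
      if (2 : Int) ∣ (j : Int) then (l[j]?).map Neg.neg else l[j]? := by
  by_cases hj : j < l.length
  · rw [List.getElem?_map, PySem.List.getElem?_enumerate]
    rw [List.getElem?_eq_getElem hj]
    by_cases hd : (2 : Int) ∣ (j : Int)
    · simp [hd]
    · simp [hd]
  · have h1 : l[j]? = none := List.getElem?_eq_none (by omega)
    have h2 : ((PySem.List.enumerate l 0).map (fun p => if PySem.Int.mod p.1 2 == 0 then -p.2 else p.2))[j]? = none := by
      apply List.getElem?_eq_none
      simp [PySem.List.length_enumerate]
      omega
    rw [h2]
    simp [h1]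

theorem negloop_eq_enumMap (l : List Int) :
    (PySem.List.pyRange 0 (l.length : Int) 2).foldl
        (fun a i => PySem.List.pySetD a i (-(PySem.List.pyGetD a i 0))) l =
      (PySem.List.enumerate l 0).map (fun p => if PySem.Int.mod p.1 2 == 0 then -p.2 else p.2) := by
  apply List.ext_getElem?
  intro j
  rw [foldl_negset_getElem? _ _ (nodup_pyRange_two _)
        (by intro i hi; have := (mem_pyRange_two _ i).mp hi; omega),
      enumMap_getElem?]
  by_cases hj : j < l.length
  · have : ((j : Int) ∈ PySem.List.pyRange 0 (l.length : Int) 2) ↔ (2 : Int) ∣ (j : Int) := by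
      rw [mem_pyRange_two]; omega
    by_cases hd : (2 : Int) ∣ (j : Int) <;> simp [this, hd]
  · have h1 : l[j]? = none := List.getElem?_eq_none (by omega)
    rw [h1]
    split_ifs <;> simp

-- A's glue is concatenation
theorem glueA_eq (a1 a2 : List Int) : glueA a1 a2 = a1 ++ a2 := by
  unfold glueA
  rw [foldl_append_map, PySem.List.map_pyGetD_pyRange_zero']

-- B's DP loop builds exactly the fib prefix
theorem fibList_succ (m : Nat) : fibList (m + 1) = fibList m ++ [fiboA (m + 1)] := by
  unfold fibList
  rw [List.range_succ, List.map_append]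
  rfl

theorem length_fibList (m : Nat) : (fibList m).length = m + 1 := by
  unfold fibList; simp

theorem growFibsB_inv (b : Int) (m : Nat) (hm : 1 ≤ m) :
    growFibsB b (fibList m) = fibList (max m b.toNat) := by
  rw [growFibsB]
  by_cases h : (((fibList m).length : Nat) : Int) ≤ b
  · rw [if_pos h]
    have hmb : (m : Int) + 1 ≤ b := by
      rw [length_fibList] at h; push_cast at h; omega
    have hg1 : PySem.List.pyGetD (fibList m) (-1) 0 = fiboA m := by
      have e : (-1 : Int) = -((1 : Nat) : Int) := by norm_num
      rw [e, PySem.List.pyGetD_neg_natCast _ _ _ (by omega) (by rw [length_fibList]; omega)]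
      simp [fibList]
    have hg2 : PySem.List.pyGetD (fibList m) (-2) 0 = fiboA (m - 1) := by
      have e : (-2 : Int) = -((2 : Nat) : Int) := by norm_num
      rw [e, PySem.List.pyGetD_neg_natCast _ _ _ (by omega) (by rw [length_fibList]; omega)]
      simp only [fibList, List.length_map, List.length_range]
      rw [List.getElem_map, List.getElem_range]
      have e2 : m + 1 - 2 = m - 1 := by omega
      rw [e2]
    rw [hg1, hg2, show fiboA m + fiboA (m - 1) = fiboA (m + 1) from (fiboA_add m hm).symm,
        ← fibList_succ, growFibsB_inv b (m + 1) (by omega)]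
    congr 1
    omega
  · rw [if_neg h]
    have : b.toNat ≤ m := by rw [length_fibList] at h; push_cast at h; omega
    rw [Nat.max_eq_left this]
termination_by (b + 1 - (m : Int)).toNat
decreasing_by rw [length_fibList] at h; push_cast at h; omega

theorem tail_reverse_fibList (n : Nat) : (fibList n).tail.reverse = revTail n := by
  unfold fibList revTail
  rw [List.range_succ_eq_map]
  simp [List.map_map, Function.comp_def, Nat.succ_eq_add_one]

theorem nego_fibo_alt_eq (n : Nat) :
    nego_fibo_alt (n : Int) =
      ((PySem.List.enumerate (revTail n) 0).map
        (fun p => if PySem.Int.mod p.1 2 == 0 then -p.2 else p.2)) ++ fibList n := by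
  unfold nego_fibo_alt
  dsimp only []
  have h01 : ([0, 1] : List Int) = fibList 1 := by decide
  have hgrow : growFibsB (n : Int) [0, 1] = fibList (max 1 n) := by
    rw [h01, growFibsB_inv _ 1 le_rfl, Int.toNat_natCast]
  have hslice : PySem.List.slice (fibList (max 1 n)) none (some ((n : Int) + 1)) = fibList n := by
    rw [PySem.List.slice_to _ (by omega)]
    have : ((n : Int) + 1).toNat = n + 1 := by omega
    rw [this]
    unfold fibList
    rw [← List.map_take, List.take_range]
    have hmin : min (n + 1) (max 1 n + 1) = n + 1 := by omega
    rw [hmin]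
  rw [hgrow, hslice, PySem.List.slice_from_one, tail_reverse_fibList]

theorem nego_fibo_eq (n : Nat) :
    nego_fibo (n : Int) =
      ((PySem.List.pyRange 0 ((revTail n).length : Int) 2).foldl
        (fun a i => PySem.List.pySetD a i (-(PySem.List.pyGetD a i 0))) (revTail n)) ++ fibList n := by
  unfold nego_fibo mirrorA
  dsimp only []
  rw [fillerA_eq]
  simp only [fibList_reverse, remove?_append_zero (zero_not_mem_revTail n)]
  rw [glueA_eq]

-- ===== VERDICT (by name: the statement is the Claim_ definition above) =====
theorem nego_fibo_spec : Claim_equal_nego_fibo := by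
  intro border _ hpre
  unfold Spec_nego_fibo Pre_nego_fibo at *
  obtain ⟨n, rfl⟩ : ∃ n : Nat, border = (n : Int) := ⟨border.toNat, by omega⟩
  rw [nego_fibo_eq, nego_fibo_alt_eq, negloop_eq_enumMap]
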